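-- pv_equiv track=rewrite | github.com/Yosef-Ali/amharic-hnet-v2 | src/linguistic_analyzer.py | _generate_cultural_context
-- ===== SOURCE A (Python) =====
-- from typing import Dict, List, Tuple, Set, Optional
--
-- def _generate_cultural_context(issues: List[Dict], words: List[str]) -> str:
--     """Generate cultural context explanation"""
--     contexts = []
--
--     if any(issue['type'] == 'sacred_term' for issue in issues):
--         contexts.append("Text contains religious/sacred terminology requiring reverent treatment")
--
--     if any(issue['type'] == 'ethnic_term' for issue in issues):
--         contexts.append("Text references Ethiopian ethnic groups requiring respectful representation")
--
--     if any(issue['type'] == 'historical_term' for issue in issues):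
--         contexts.append("Text includes historically sensitive terms requiring contextual awareness")
--
--     if not contexts:
--         contexts.append("Text appears culturally neutral with standard Amharic vocabulary")
--
--     return "; ".join(contexts)
-- ===== SOURCE B (Python) =====
-- _CULTURAL_TABLE = [
--     ('sacred_term', "Text contains religious/sacred terminology requiring reverent treatment"),
--     ('ethnic_term', "Text references Ethiopian ethnic groups requiring respectful representation"),
--     ('historical_term', "Text includes historically sensitive terms requiring contextual awareness"),
-- ]
--
-- def _generate_cultural_context(issues, words):
--     """Generate cultural context explanation (table-driven single pass over a seen-set)."""
--     seen = set()
--     for issue in issues: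
--         if all(key in seen for key, _ in _CULTURAL_TABLE):
--             break
--         seen.add(issue['type'])
--     contexts = [msg for key, msg in _CULTURAL_TABLE if key in seen]
--     return "; ".join(contexts) or "Text appears culturally neutral with standard Amharic vocabulary"
-- ===== Notes on version B (the rewrite author's own statement) =====
-- stated objective: alternative
-- what changed: Replaces A's three separate any() scans and branch-built message list with one pass collecting issue types into a set (stopping once every table key has been seen) and a filter of a fixed (type, message) table, with the neutral fallback via join-or-default.
import Mathlib
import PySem

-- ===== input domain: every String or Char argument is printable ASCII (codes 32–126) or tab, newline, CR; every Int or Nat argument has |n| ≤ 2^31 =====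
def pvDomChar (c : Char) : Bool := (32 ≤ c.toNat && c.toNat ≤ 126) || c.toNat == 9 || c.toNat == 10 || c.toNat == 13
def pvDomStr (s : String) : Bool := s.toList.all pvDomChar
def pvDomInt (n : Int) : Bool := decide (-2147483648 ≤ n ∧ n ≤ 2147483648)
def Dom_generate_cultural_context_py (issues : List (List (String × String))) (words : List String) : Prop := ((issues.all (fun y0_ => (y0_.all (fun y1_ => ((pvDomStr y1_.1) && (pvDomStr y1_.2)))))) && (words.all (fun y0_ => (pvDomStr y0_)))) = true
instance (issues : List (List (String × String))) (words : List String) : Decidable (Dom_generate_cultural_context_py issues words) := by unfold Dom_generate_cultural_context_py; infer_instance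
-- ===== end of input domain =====

-- B replaces A's three any() scans and branch-built list with one pass collecting
-- issue types into a set (stopping once every table key is seen) plus a filter of
-- a fixed (type, message) table (objective: alternative; same return values).

-- issue['type']: first-match association-list lookup (Python dict access; none = KeyError)
def pvLookup? (d : List (String × String)) (k : String) : Option String :=
  match d with
  | [] => none
  | (a, b) :: rest => if a == k then some b else pvLookup? rest k

-- ===== PORT A =====
-- any(issue['type'] == t for issue in issues); none = KeyError raised during the scan
def pvAnyType (t : String) : List (List (String × String)) → Option Bool
  | [] => some false
  | d :: rest =>
    match pvLookup? d "type" with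
    | none => none
    | some v => if v == t then some true else pvAnyType t rest

def generate_cultural_context_py (issues : List (List (String × String))) (_words : List String) : String :=
  match pvAnyType "sacred_term" issues, pvAnyType "ethnic_term" issues, pvAnyType "historical_term" issues with
  | some s, some e, some h =>
    let contexts : List String :=
      (if s then ["Text contains religious/sacred terminology requiring reverent treatment"] else []) ++
      (if e then ["Text references Ethiopian ethnic groups requiring respectful representation"] else []) ++
      (if h then ["Text includes historically sensitive terms requiring contextual awareness"] else [])
    let contexts := if contexts.isEmpty then ["Text appears culturally neutral with standard Amharic vocabulary"] else contexts
    PySem.Str.join "; " contexts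
  | _, _, _ => ""   -- KeyError (excluded by Pre_)

-- ===== PORT B =====
-- the fixed (type, message) table _CULTURAL_TABLE
def pvTable : List (String × String) :=
  [("sacred_term", "Text contains religious/sacred terminology requiring reverent treatment"),
   ("ethnic_term", "Text references Ethiopian ethnic groups requiring respectful representation"),
   ("historical_term", "Text includes historically sensitive terms requiring contextual awareness")]

-- the collecting loop: seen.add(issue['type']) with early break once every table key is seen;
-- none = KeyError
def pvCollect : List (List (String × String)) → PySem.Set String → Option (PySem.Set String)
  | [], seen => some seen
  | d :: rest, seen =>
    if pvTable.all (fun p => PySem.Set.contains seen p.1) then some seen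
    else
      match pvLookup? d "type" with
      | none => none
      | some t => pvCollect rest (PySem.Set.add seen t)

def generate_cultural_context_py_alt (issues : List (List (String × String))) (_words : List String) : String :=
  match pvCollect issues PySem.Set.empty with
  | some seen =>
    let contexts := pvTable.filterMap (fun p => if PySem.Set.contains seen p.1 then some p.2 else none)
    let j := PySem.Str.join "; " contexts
    if j == "" then "Text appears culturally neutral with standard Amharic vocabulary" else j
  | none => ""   -- KeyError (excluded by Pre_)

-- ===== PRECONDITION & SPEC =====
-- closed-form view of a dict's 'type' entry (first pair keyed "type"), for Pre_
def pvTypeVal? (d : List (String × String)) : Option String :=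
  (d.find? (fun p => p.1 == "type")).map Prod.snd

-- Pre_ excludes exactly the inputs where Python A raises KeyError: a dict without
-- a 'type' key that some any() scan reaches, i.e. one not preceded by all three types.
def Pre_generate_cultural_context_py (issues : List (List (String × String))) (words : List String) : Prop :=
  ∀ i, i < issues.length → pvTypeVal? (issues.getD i []) = none →
    ((issues.take i).any (fun d => pvTypeVal? d == some "sacred_term") = true ∧
     (issues.take i).any (fun d => pvTypeVal? d == some "ethnic_term") = true ∧
     (issues.take i).any (fun d => pvTypeVal? d == some "historical_term") = true)

instance (issues : List (List (String × String))) (words : List String) : Decidable (Pre_generate_cultural_context_py issues words) := by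
  unfold Pre_generate_cultural_context_py; infer_instance

def pvWitness_generate_cultural_context_py : (List (List (String × String))) × List String :=
  ([[("type", "sacred_term")], [("type", "other")]], ["abc"])

def Spec_generate_cultural_context_py (issues : List (List (String × String))) (words : List String) (out : String) : Prop := out = generate_cultural_context_py_alt issues words
instance (issues : List (List (String × String))) (words : List String) (out : String) : Decidable (Spec_generate_cultural_context_py issues words out) := by unfold Spec_generate_cultural_context_py; infer_instance

-- ===== CLAIM (what is proved, stated in full; the proofs are below) =====
def Claim_equal_generate_cultural_context_py : Prop := ∀ (issues : List (List (String × String))) (words : List String), Dom_generate_cultural_context_py issues words → Pre_generate_cultural_context_py issues words → Spec_generate_cultural_context_py issues words (generate_cultural_context_py issues words)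

-- ===== LEMMAS AND PROOFS =====

-- does type t occur (as the 'type' value of some dict) in l?
def pvHas (t : String) (l : List (List (String × String))) : Bool :=
  l.any (fun d => pvLookup? d "type" == some t)

lemma pvLookup_eq_typeVal (d : List (String × String)) : pvLookup? d "type" = pvTypeVal? d := by
  induction d with
  | nil => simp [pvLookup?, pvTypeVal?]
  | cons p rest ih =>
    obtain ⟨a, b⟩ := p
    by_cases h : (a == "type") = true
    · simp [pvLookup?, pvTypeVal?, List.find?, h]
    · simp only [Bool.not_eq_true] at h
      simp [pvLookup?, pvTypeVal?, List.find?, h] at ih ⊢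
      exact ih

lemma pvHas_eq (t : String) (l : List (List (String × String))) :
    pvHas t l = l.any (fun d => pvTypeVal? d == some t) := by
  simp [pvHas, pvLookup_eq_typeVal]

lemma pvContains_add (s : PySem.Set String) (v x : String) :
    PySem.Set.contains (PySem.Set.add s v) x = (PySem.Set.contains s x || x == v) := by
  rw [PySem.Set.add_eq_ite]
  by_cases hmem : v ∈ s
  · rw [if_pos hmem]
    by_cases hxv : x = v
    · subst hxv; simp [hmem]
    · simp [hxv]
  · rw [if_neg hmem]
    by_cases hxv : x = v <;> simp [hxv]

lemma pvAnyType_eq (t : String) (l : List (List (String × String)))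
    (h : ∀ i, i < l.length → pvLookup? (l.getD i []) "type" = none → pvHas t (l.take i) = true) :
    pvAnyType t l = some (pvHas t l) := by
  induction l with
  | nil => simp [pvAnyType, pvHas]
  | cons d rest ih =>
    have h0 := h 0 (by simp)
    cases hd : pvLookup? d "type" with
    | none =>
      exfalso
      have := h0 (by simpa using hd)
      simp [pvHas] at this
    | some v =>
      by_cases hv : v = t
      · subst hv
        simp [pvAnyType, hd, pvHas]
      · have hrest : ∀ i, i < rest.length → pvLookup? (rest.getD i []) "type" = none →
            pvHas t (rest.take i) = true := by
          intro i hi hn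
          have := h (i + 1) (by simpa using Nat.succ_lt_succ hi) (by simpa using hn)
          simpa [pvHas, hd, hv] using this
        have hbeq : (v == t) = false := by simp [hv]
        simp [pvAnyType, hd, hbeq, ih hrest, pvHas]

lemma pvCollect_eq (l : List (List (String × String))) (s : PySem.Set String)
    (hp : ∀ i, i < l.length → pvLookup? (l.getD i []) "type" = none →
        ∀ p ∈ pvTable, (PySem.Set.contains s p.1 || pvHas p.1 (l.take i)) = true) :
    ∃ seen, pvCollect l s = some seen ∧
      ∀ p ∈ pvTable, PySem.Set.contains seen p.1 = (PySem.Set.contains s p.1 || pvHas p.1 l) := by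
  induction l generalizing s with
  | nil =>
    exact ⟨s, rfl, by intro p _; simp [pvHas]⟩
  | cons d rest ih =>
    by_cases hb : (pvTable.all (fun p => PySem.Set.contains s p.1)) = true
    · refine ⟨s, ?_, ?_⟩
      · simp only [pvCollect]
        rw [if_pos hb]
      · intro p hpmem
        have := (List.all_eq_true.mp hb) p hpmem
        simp only [this, Bool.true_or]
    · cases hd : pvLookup? d "type" with
      | none =>
        exfalso
        apply hb
        rw [List.all_eq_true]
        intro p hpmem
        have := hp 0 (by simp) (by simpa using hd) p hpmem
        simpa [pvHas] using this
      | some v =>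
        have hswap : ∀ t : String, (t == v) = (v == t) := by
          intro t
          by_cases h : t = v
          · subst h; rfl
          · have h' : ¬ v = t := fun he => h he.symm
            simp [h, h']
        have hrest : ∀ i, i < rest.length → pvLookup? (rest.getD i []) "type" = none →
            ∀ p ∈ pvTable, (PySem.Set.contains (PySem.Set.add s v) p.1 || pvHas p.1 (rest.take i)) = true := by
          intro i hi hn p hpmem
          have h0 := hp (i + 1) (by simpa using Nat.succ_lt_succ hi) (by simpa using hn) p hpmem
          rw [pvContains_add, hswap]
          simp only [List.take_succ_cons, pvHas, List.any_cons, hd] at h0 ⊢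
          simp only [Bool.or_eq_true, beq_iff_eq, Option.some.injEq] at h0 ⊢
          tauto
        obtain ⟨seen, hc, hcontains⟩ := ih (PySem.Set.add s v) hrest
        refine ⟨seen, ?_, ?_⟩
        · simp only [pvCollect]
          rw [if_neg hb, hd]
          exact hc
        · intro p hpmem
          rw [hcontains p hpmem, pvContains_add, hswap, Bool.eq_iff_iff]
          simp only [pvHas, List.any_cons, hd, Bool.or_eq_true, beq_iff_eq, Option.some.injEq]
          tauto

-- ===== VERDICT (by name: the statement is the Claim_ definition above) =====
theorem generate_cultural_context_py_spec : Claim_equal_generate_cultural_context_py := by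
  intro issues words _ hpre
  unfold Spec_generate_cultural_context_py
  unfold Pre_generate_cultural_context_py at hpre
  have hpre' : ∀ i, i < issues.length → pvLookup? (issues.getD i []) "type" = none →
      (pvHas "sacred_term" (issues.take i) = true ∧ pvHas "ethnic_term" (issues.take i) = true ∧
       pvHas "historical_term" (issues.take i) = true) := by
    intro i hi hn
    have := hpre i hi (by rw [← pvLookup_eq_typeVal]; exact hn)
    simpa [pvHas_eq] using this
  clear hpre
  have hs := pvAnyType_eq "sacred_term" issues (fun i hi hn => (hpre' i hi hn).1)
  have he := pvAnyType_eq "ethnic_term" issues (fun i hi hn => (hpre' i hi hn).2.1)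
  have hh := pvAnyType_eq "historical_term" issues (fun i hi hn => (hpre' i hi hn).2.2)
  have hp : ∀ i, i < issues.length → pvLookup? (issues.getD i []) "type" = none →
      ∀ p ∈ pvTable, (PySem.Set.contains PySem.Set.empty p.1 || pvHas p.1 (issues.take i)) = true := by
    intro i hi hn p hpmem
    obtain ⟨h1, h2, h3⟩ := hpre' i hi hn
    simp only [pvTable, List.mem_cons, List.not_mem_nil, or_false] at hpmem
    rcases hpmem with rfl | rfl | rfl <;> simp [h1, h2, h3]
  obtain ⟨seen, hc, hcontains⟩ := pvCollect_eq issues PySem.Set.empty hp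
  have c1 := hcontains ("sacred_term", "Text contains religious/sacred terminology requiring reverent treatment") (by simp [pvTable])
  have c2 := hcontains ("ethnic_term", "Text references Ethiopian ethnic groups requiring respectful representation") (by simp [pvTable])
  have c3 := hcontains ("historical_term", "Text includes historically sensitive terms requiring contextual awareness") (by simp [pvTable])
  have hempty : ∀ x : String, PySem.Set.contains PySem.Set.empty x = false := by
    intro x; rfl
  simp only [hempty, Bool.false_or] at c1 c2 c3
  unfold generate_cultural_context_py generate_cultural_context_py_alt
  rw [hs, he, hh, hc]
  simp only [pvTable, List.filterMap, c1, c2, c3]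
  cases hS : pvHas "sacred_term" issues <;> cases hE : pvHas "ethnic_term" issues <;>
    cases hH : pvHas "historical_term" issues <;> decide
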